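-- pv_equiv track=rewrite | github.com/biesnecker/aoc-anyhow | 202501.py | partTwo
-- ===== SOURCE A (Python) =====
-- from typing import Tuple
--
-- def partTwo(input: list[Tuple[str, int]]) -> int:
--     res = 0
--     pos = 50
--     for row in input:
--         match row:
--             case ("L", amt):
--                 rots = amt // 100
--                 rest = amt % 100
--                 res += rots
--                 if rest >= pos and pos != 0:
--                     res += 1
--                 pos = (pos - rest) % 100
--             case ("R", amt):
--                 rots = amt // 100
--                 rest = amt % 100
--                 res += rots
--                 if rest >= (100 - pos) and pos != 0:
--                     res += 1
--                 pos = (pos + rest) % 100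
--             case _:
--                 raise Exception(f"Invalid input: {row}")
--     return res
-- ===== SOURCE B (Python) =====
-- def partTwo(input):
--     res = 0
--     a = 50
--     for row in input:
--         match row:
--             case ("R", amt):
--                 a_new = a + amt
--                 res += a_new // 100 - a // 100
--             case ("L", amt):
--                 a_new = a - amt
--                 res += (a - 1) // 100 - (a_new - 1) // 100
--             case _:
--                 raise Exception(f"Invalid input: {row}")
--         a = a_new
--     return res
-- ===== Notes on version B (the rewrite author's own statement) =====
-- stated objective: alternative
-- what changed: B replaces A's mod-100 position with per-step rots/rest bookkeeping and boundary comparisons by an unbounded absolute odometer, counting zero-mark crossings as a floor-division difference per row.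
import Mathlib
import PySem

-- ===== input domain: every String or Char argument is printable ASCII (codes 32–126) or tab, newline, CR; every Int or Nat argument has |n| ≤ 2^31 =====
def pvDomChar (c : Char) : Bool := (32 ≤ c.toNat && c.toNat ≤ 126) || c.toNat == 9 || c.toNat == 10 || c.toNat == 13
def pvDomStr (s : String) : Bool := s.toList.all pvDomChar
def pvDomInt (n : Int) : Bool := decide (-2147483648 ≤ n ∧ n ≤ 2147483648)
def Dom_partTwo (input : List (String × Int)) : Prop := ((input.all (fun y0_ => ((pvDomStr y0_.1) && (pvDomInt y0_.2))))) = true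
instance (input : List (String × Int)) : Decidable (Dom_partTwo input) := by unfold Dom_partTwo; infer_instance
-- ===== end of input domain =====

-- B tracks an unbounded absolute odometer and counts crossings by floor-division differences,
-- instead of A's mod-100 position with rots/rest and boundary comparisons (objective: alternative).


-- ===== PORT A =====
-- one loop iteration of A: state (res, pos); the invalid row (Python: raise) is outside Pre_
-- and leaves the state unchanged here.
def partTwoStep (st : Int × Int) (row : String × Int) : Int × Int :=
  if row.1 = "L" then
    let amt := row.2
    let rots := PySem.Int.floordiv amt 100
    let rest := PySem.Int.mod amt 100
    let res := st.1 + rots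
    let res := if rest ≥ st.2 ∧ st.2 ≠ 0 then res + 1 else res
    (res, PySem.Int.mod (st.2 - rest) 100)
  else if row.1 = "R" then
    let amt := row.2
    let rots := PySem.Int.floordiv amt 100
    let rest := PySem.Int.mod amt 100
    let res := st.1 + rots
    let res := if rest ≥ (100 - st.2) ∧ st.2 ≠ 0 then res + 1 else res
    (res, PySem.Int.mod (st.2 + rest) 100)
  else st  -- Python raises here; excluded by Pre_partTwo

def partTwo (input : List (String × Int)) : Int :=
  (input.foldl partTwoStep (0, 50)).1

-- ===== PORT B =====
-- one loop iteration of B: state (res, a) with a the absolute odometer.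
def partTwoAltStep (st : Int × Int) (row : String × Int) : Int × Int :=
  if row.1 = "R" then
    let aNew := st.2 + row.2
    (st.1 + (PySem.Int.floordiv aNew 100 - PySem.Int.floordiv st.2 100), aNew)
  else if row.1 = "L" then
    let aNew := st.2 - row.2
    (st.1 + (PySem.Int.floordiv (st.2 - 1) 100 - PySem.Int.floordiv (aNew - 1) 100), aNew)
  else st  -- Python raises here; excluded by Pre_partTwo

def partTwo_alt (input : List (String × Int)) : Int :=
  (input.foldl partTwoAltStep (0, 50)).1

-- ===== PRECONDITION & SPEC =====
-- Pre_ excludes exactly the rows whose direction is neither "L" nor "R": on those both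
-- Pythons raise Exception ("Invalid input").
def Pre_partTwo (input : List (String × Int)) : Prop :=
  ∀ row ∈ input, row.1 = "L" ∨ row.1 = "R"
instance (input : List (String × Int)) : Decidable (Pre_partTwo input) := by unfold Pre_partTwo; infer_instance

def pvWitness_partTwo : (List (String × Int)) := [("R", 75), ("L", 130), ("R", 0)]

def Spec_partTwo (input : List (String × Int)) (out : Int) : Prop := out = partTwo_alt input
instance (input : List (String × Int)) (out : Int) : Decidable (Spec_partTwo input out) := by unfold Spec_partTwo; infer_instance

-- ===== CLAIM (what is proved, stated in full; the proofs are below) =====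
def Claim_equal_partTwo : Prop := ∀ (input : List (String × Int)), Dom_partTwo input → Pre_partTwo input → Spec_partTwo input (partTwo input)

-- ===== LEMMAS AND PROOFS =====

-- Relation between the two loop states: equal counters, A's position = B's odometer mod 100.
theorem step_rel (res a : Int) (row : String × Int)
    (h : row.1 = "L" ∨ row.1 = "R") :
    partTwoStep (res, PySem.Int.mod a 100) row
      = ((partTwoAltStep (res, a) row).1, PySem.Int.mod (partTwoAltStep (res, a) row).2 100) := by
  rcases h with h | h <;>
    simp only [partTwoStep, partTwoAltStep, h, if_true, if_false,
      String.reduceEq, Prod.mk.injEq] <;>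
  · simp only [PySem.Int.floordiv_eq_ediv_of_pos (by norm_num : (0:Int) < 100),
      PySem.Int.mod_eq_emod_of_pos (by norm_num : (0:Int) < 100)]
    constructor
    · split_ifs <;> omega
    · omega

theorem fold_rel (input : List (String × Int)) (res a : Int)
    (h : ∀ row ∈ input, row.1 = "L" ∨ row.1 = "R") :
    input.foldl partTwoStep (res, PySem.Int.mod a 100)
      = ((input.foldl partTwoAltStep (res, a)).1,
         PySem.Int.mod (input.foldl partTwoAltStep (res, a)).2 100) := by
  induction input generalizing res a with
  | nil => simp
  | cons r t ih =>
    simp only [List.foldl_cons]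
    rw [step_rel res a r (h r (by simp))]
    exact ih _ _ (fun row hm => h row (by simp [hm]))

-- ===== VERDICT (by name: the statement is the Claim_ definition above) =====
theorem partTwo_spec : Claim_equal_partTwo := by
  intro input _ hpre
  unfold Spec_partTwo partTwo partTwo_alt
  have h := fold_rel input 0 50 hpre
  rw [show PySem.Int.mod 50 100 = (50:Int) from by decide] at h
  rw [h]
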